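-- pv_equiv track=rewrite | github.com/JamesJohnson11/mastermind | challenge/helpers.py | common_digit_count
-- ===== SOURCE A (Python) =====
-- from collections import Counter
--
-- def common_digit_count(guess, num):
--     count_guess = Counter(guess)
--     count_num = Counter(num)
--     sum_ = 0
--     seen = set()
--
--     for s in guess:
--         if s in num and s not in seen:
--             sum_ += count_num[s] if count_guess[s] > count_num[s] else count_guess[s]
--             seen.add(s)
--     return sum_
-- ===== SOURCE B (Python) =====
-- def common_digit_count(guess, num):
--     a = sorted(list(guess))
--     b = sorted(list(num))
--     i = j = count = 0
--     while i < len(a) and j < len(b):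
--         if a[i] == b[j]:
--             count += 1
--             i += 1
--             j += 1
--         elif a[i] < b[j]:
--             i += 1
--         else:
--             j += 1
--     return count
-- ===== Notes on version B (the rewrite author's own statement) =====
-- stated objective: alternative
-- what changed: Replaces the two Counters plus a seen-set loop with an 's in num' scan per character by sorting both sequences and counting matches in a single two-pointer merge walk.
import Mathlib
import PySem

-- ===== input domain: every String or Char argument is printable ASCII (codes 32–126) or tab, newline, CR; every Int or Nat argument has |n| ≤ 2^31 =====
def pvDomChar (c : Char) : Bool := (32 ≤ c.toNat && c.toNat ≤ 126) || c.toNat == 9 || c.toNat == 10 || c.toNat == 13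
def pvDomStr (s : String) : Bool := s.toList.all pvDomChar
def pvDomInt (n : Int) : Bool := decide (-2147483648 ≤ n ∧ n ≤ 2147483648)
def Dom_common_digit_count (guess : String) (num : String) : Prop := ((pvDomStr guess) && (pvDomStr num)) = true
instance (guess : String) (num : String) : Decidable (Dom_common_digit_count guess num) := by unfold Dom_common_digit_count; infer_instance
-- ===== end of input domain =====

-- B replaces the Counter/seen-set loop of A by sorting both character lists and
-- counting equal pairs in a single two-pointer merge walk (alternative algorithm, same result).


-- ===== PORT A =====
-- 's in num' in the Python tests a ONE-character string as a substring of num,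
-- which is exactly character membership, ported as List.contains on num's characters.
def pvStepA (count_guess count_num : PySem.Dict Char Int) (numL : List Char)
    (st : Int × PySem.Set Char) (s : Char) : Int × PySem.Set Char :=
  if numL.contains s && !(PySem.Set.contains st.2 s) then
    (st.1 + (if count_guess.getD s 0 > count_num.getD s 0
             then count_num.getD s 0 else count_guess.getD s 0),
     PySem.Set.add st.2 s)
  else st

def common_digit_count (guess : String) (num : String) : Int :=
  let count_guess := PySem.Dict.counter guess.toList
  let count_num := PySem.Dict.counter num.toList
  (guess.toList.foldl (pvStepA count_guess count_num num.toList)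
    (0, PySem.Set.empty)).1

-- ===== PORT B =====
-- the two-pointer merge walk of Source B, as recursion on the two (sorted) lists
def pvMergeCnt : List Char → List Char → Int
  | [], _ => 0
  | _ :: _, [] => 0
  | x :: xs, y :: ys =>
    if x = y then 1 + pvMergeCnt xs ys
    else if x < y then pvMergeCnt xs (y :: ys)
    else pvMergeCnt (x :: xs) ys
termination_by a b => a.length + b.length

def common_digit_count_alt (guess : String) (num : String) : Int :=
  pvMergeCnt (PySem.List.sorted guess.toList (fun c => c))
             (PySem.List.sorted num.toList (fun c => c))

-- ===== PRECONDITION & SPEC =====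
def Spec_common_digit_count (guess : String) (num : String) (out : Int) : Prop := out = common_digit_count_alt guess num
instance (guess : String) (num : String) (out : Int) : Decidable (Spec_common_digit_count guess num out) := by unfold Spec_common_digit_count; infer_instance

-- ===== CLAIM (what is proved, stated in full; the proofs are below) =====
def Claim_equal_common_digit_count : Prop := ∀ (guess : String) (num : String), Dom_common_digit_count guess num → Spec_common_digit_count guess num (common_digit_count guess num)

-- ===== LEMMAS AND PROOFS =====

-- the common pivot: for each distinct character of g, min of the two multiplicities
def pvKey (g n : List Char) : Int :=
  ∑ s ∈ g.toFinset, (min (g.count s) (n.count s) : Int)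

-- ---- B side: the merge walk on sorted lists computes the multiset-intersection size ----
lemma pvMergeCnt_eq_inter_card :
    ∀ (xs ys : List Char), xs.Pairwise (· ≤ ·) → ys.Pairwise (· ≤ ·) →
    pvMergeCnt xs ys = (((xs : Multiset Char) ∩ (ys : Multiset Char)).card : Int) := by
  intro xs ys
  induction xs, ys using pvMergeCnt.induct with
  | case1 ys => intro _ _; simp [pvMergeCnt]
  | case2 x xs => intro _ _; simp [pvMergeCnt]
  | case3 xs y ys ih =>
    intro hxs hys
    rw [pvMergeCnt, if_pos rfl, ih hxs.of_cons hys.of_cons]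
    rw [← Multiset.cons_coe (l := xs), ← Multiset.cons_coe (l := ys),
        Multiset.cons_inter_of_pos _ (Multiset.mem_cons_self y _),
        Multiset.erase_cons_head]
    push_cast [Multiset.card_cons]; ring
  | case4 x xs y ys hne hlt ih =>
    intro hxs hys
    have hx : x ∉ (y :: ys) := by
      intro hmem
      rcases List.mem_cons.mp hmem with h | h
      · exact hne h
      · exact absurd (List.rel_of_pairwise_cons hys h) (not_le.mpr hlt)
    have hinter : ((x :: xs : List Char) : Multiset Char) ∩ ((y :: ys : List Char) : Multiset Char)
        = ((xs : List Char) : Multiset Char) ∩ ((y :: ys : List Char) : Multiset Char) := by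
      rw [← Multiset.cons_coe (l := xs), Multiset.cons_inter_of_neg _ (by simpa using hx)]
    rw [pvMergeCnt, if_neg hne, if_pos hlt, ih hxs.of_cons hys, hinter]
  | case5 x xs y ys hne hnlt ih =>
    intro hxs hys
    have hy : y ∉ (x :: xs) := by
      intro hmem
      rcases List.mem_cons.mp hmem with h | h
      · exact hne h.symm
      · exact absurd (List.rel_of_pairwise_cons hxs h)
          (not_le.mpr (lt_of_le_of_ne (not_lt.mp hnlt) (Ne.symm hne)))
    have hinter : ((x :: xs : List Char) : Multiset Char) ∩ ((y :: ys : List Char) : Multiset Char)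
        = ((x :: xs : List Char) : Multiset Char) ∩ ((ys : List Char) : Multiset Char) := by
      rw [Multiset.inter_comm, ← Multiset.cons_coe (l := ys),
          Multiset.cons_inter_of_neg _ (by simpa using hy), Multiset.inter_comm]
    rw [pvMergeCnt, if_neg hne, if_neg hnlt, ih hxs hys.of_cons, hinter]

lemma pvInterCard_eq_key (g n : List Char) :
    (((g : Multiset Char) ∩ (n : Multiset Char)).card : Int) = pvKey g n := by
  have hsum := Multiset.toFinset_sum_count_eq ((g : Multiset Char) ∩ (n : Multiset Char))
  have hsub : ((g : Multiset Char) ∩ (n : Multiset Char)).toFinset ⊆ g.toFinset := by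
    intro a ha
    have h1 := Multiset.mem_toFinset.mp ha
    have h2 : a ∈ (g : Multiset Char) := Multiset.mem_of_le Multiset.inter_le_left h1
    simpa using h2
  have hext : ∑ a ∈ g.toFinset, Multiset.count a ((g : Multiset Char) ∩ (n : Multiset Char))
      = ∑ a ∈ ((g : Multiset Char) ∩ (n : Multiset Char)).toFinset,
          Multiset.count a ((g : Multiset Char) ∩ (n : Multiset Char)) := by
    refine (Finset.sum_subset hsub ?_).symm
    intro a _ ha
    exact Multiset.count_eq_zero.mpr (fun hmem => ha (Multiset.mem_toFinset.mpr hmem))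
  rw [← hsum, ← hext]
  unfold pvKey
  push_cast
  refine Finset.sum_congr rfl ?_
  intro a _
  rw [Multiset.count_inter]
  push_cast [Multiset.coe_count]
  rfl

lemma pvAlt_eq_key (guess num : String) :
    common_digit_count_alt guess num = pvKey guess.toList num.toList := by
  unfold common_digit_count_alt
  rw [pvMergeCnt_eq_inter_card _ _
        (PySem.List.sorted_pairwise guess.toList (fun c => c))
        (PySem.List.sorted_pairwise num.toList (fun c => c))]
  rw [Multiset.coe_eq_coe.mpr (PySem.List.sorted_perm guess.toList (fun c => c) false),
      Multiset.coe_eq_coe.mpr (PySem.List.sorted_perm num.toList (fun c => c) false)]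
  exact pvInterCard_eq_key _ _

-- ---- A side: the loop with the seen-set sums min-multiplicities over unseen distinct chars ----
lemma pvStepA_loop (g n : List Char) :
    ∀ (l : List Char) (acc : Int) (seen : PySem.Set Char),
    (l.foldl (pvStepA (PySem.Dict.counter g) (PySem.Dict.counter n) n) (acc, seen)).1
      = acc + ∑ s ∈ (l.toFinset \ seen.toFinset),
          (if s ∈ n then (min (g.count s) (n.count s) : Int) else 0) := by
  intro l
  induction l with
  | nil => intro acc seen; simp
  | cons s l ih =>
    intro acc seen
    rw [List.foldl_cons]
    by_cases hn : s ∈ n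
    · by_cases hs : s ∈ seen
      · have hstep : pvStepA (PySem.Dict.counter g) (PySem.Dict.counter n) n (acc, seen) s = (acc, seen) := by
          simp [pvStepA, hs]
        have hset : (s :: l).toFinset \ seen.toFinset = l.toFinset \ seen.toFinset := by
          ext z
          simp only [Finset.mem_sdiff, List.toFinset_cons, Finset.mem_insert, List.mem_toFinset]
          constructor
          · rintro ⟨h1 | h1, h2⟩
            · exact absurd (h1 ▸ hs) h2
            · exact ⟨h1, h2⟩
          · rintro ⟨h1, h2⟩; exact ⟨Or.inr h1, h2⟩
        rw [hstep, ih, hset]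
      · have hstep : pvStepA (PySem.Dict.counter g) (PySem.Dict.counter n) n (acc, seen) s
            = (acc + min ((g.count s : Int)) ((n.count s : Int)), PySem.Set.add seen s) := by
          simp only [pvStepA, List.elem_eq_true_of_mem hn, Bool.true_and,
            PySem.Dict.getD_counter]
          have hc : PySem.Set.contains seen s = false := by
            rcases Bool.eq_false_or_eq_true (PySem.Set.contains seen s) with h | h
            · exact absurd ((PySem.Set.contains_iff seen s).mp h) hs
            · exact h
          rw [hc]
          simp only [Bool.not_false, if_true]
          congr 1
          split_ifs with h <;> omega
        rw [hstep, ih]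
        have hseenadd : (PySem.Set.add seen s).toFinset = insert s seen.toFinset := by
          ext z
          simp [PySem.Set.mem_add, or_comm]
        rw [hseenadd]
        have hset : (s :: l).toFinset \ seen.toFinset
            = insert s (l.toFinset \ insert s seen.toFinset) := by
          ext z
          simp only [Finset.mem_sdiff, List.toFinset_cons, Finset.mem_insert, List.mem_toFinset]
          constructor
          · rintro ⟨h1 | h1, h2⟩
            · exact Or.inl h1
            · by_cases hz : z = s
              · exact Or.inl hz
              · exact Or.inr ⟨h1, fun h => h.elim hz fun hh => h2 hh⟩
          · rintro (h1 | ⟨h1, h2⟩)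
            · exact ⟨Or.inl h1, h1 ▸ hs⟩
            · exact ⟨Or.inr h1, fun h => h2 (Or.inr h)⟩
        rw [hset, Finset.sum_insert (by simp), if_pos hn]
        ring
    · have hstep : pvStepA (PySem.Dict.counter g) (PySem.Dict.counter n) n (acc, seen) s = (acc, seen) := by
        simp [pvStepA, hn]
      rw [hstep, ih]
      by_cases hs : s ∈ seen
      · have hset : (s :: l).toFinset \ seen.toFinset = l.toFinset \ seen.toFinset := by
          ext z
          simp only [Finset.mem_sdiff, List.toFinset_cons, Finset.mem_insert, List.mem_toFinset]
          constructor
          · rintro ⟨h1 | h1, h2⟩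
            · exact absurd (h1 ▸ hs) h2
            · exact ⟨h1, h2⟩
          · rintro ⟨h1, h2⟩; exact ⟨Or.inr h1, h2⟩
        rw [hset]
      · have hset : (s :: l).toFinset \ seen.toFinset
            = insert s (l.toFinset \ seen.toFinset) := by
          ext z
          simp only [Finset.mem_sdiff, List.toFinset_cons, Finset.mem_insert, List.mem_toFinset]
          constructor
          · rintro ⟨h1 | h1, h2⟩
            · exact Or.inl h1
            · exact Or.inr ⟨h1, h2⟩
          · rintro (h1 | ⟨h1, h2⟩)
            · exact ⟨Or.inl h1, h1 ▸ hs⟩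
            · exact ⟨Or.inr h1, h2⟩
        rw [hset]
        rw [Finset.sum_insert_of_eq_zero_if_notMem
          (f := fun z => if z ∈ n then (min ((g.count z : Int)) ((n.count z : Int))) else 0)
          (fun _ => if_neg hn)]

lemma pvA_eq_key (guess num : String) :
    common_digit_count guess num = pvKey guess.toList num.toList := by
  unfold common_digit_count
  rw [pvStepA_loop guess.toList num.toList guess.toList 0 PySem.Set.empty]
  unfold pvKey
  have hempty : (PySem.Set.empty : PySem.Set Char).toFinset = (∅ : Finset Char) := rfl
  rw [hempty, Finset.sdiff_empty, zero_add]
  refine Finset.sum_congr rfl ?_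
  intro s _
  by_cases hn : s ∈ num.toList
  · rw [if_pos hn]
  · rw [if_neg hn]
    have hz : num.toList.count s = 0 := List.count_eq_zero.mpr hn
    simp [hz]

-- ===== VERDICT (by name: the statement is the Claim_ definition above) =====
theorem common_digit_count_spec : Claim_equal_common_digit_count := by
  intro guess num _
  unfold Spec_common_digit_count
  rw [pvA_eq_key, pvAlt_eq_key]
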